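-- pv_equiv track=rewrite | github.com/kfigon/RandomCode | Algorytmy/unstructuredAlgorithms/_SPOJ/Latwe/506. Flamaster/Flamaster.py | ileTakichSamychLiterDoPrzodu
-- ===== SOURCE A (Python) =====
-- def ileTakichSamychLiterDoPrzodu(napis, startIdx):
--     poszukiwanaLitera = napis[startIdx]
--     licznik = 0
--
--     for i in range(startIdx, len(napis)):
--         if(napis[i] == poszukiwanaLitera):
--             licznik+=1
--         else:
--             break
--
--     return licznik
-- ===== SOURCE B (Python) =====
-- def ileTakichSamychLiterDoPrzodu(napis, startIdx):
--     litera = napis[startIdx]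
--     rest = napis[startIdx:]
--     return len(rest) - len(rest.lstrip(litera))
-- ===== Notes on version B (the rewrite author's own statement) =====
-- stated objective: simpler
-- what changed: Replaces the explicit index loop with a closed-form library computation: the run length is len(rest) - len(rest.lstrip(litera)) on the suffix napis[startIdx:].
-- intended difference: For negative startIdx where the suffix napis[startIdx:] consists entirely of napis[startIdx] and the first character of napis also equals it, A's range loop wraps past the end back into the prefix and double-counts (e.g. A('aa',-1)=3), while B returns the length of the consecutive run inside the suffix (B('aa',-1)=1), the intended count of consecutive equal characters forward from startIdx. — e.g. on ileTakichSamychLiterDoPrzodu("aa", -1): A returns 3, B returns 1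
import Mathlib
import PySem

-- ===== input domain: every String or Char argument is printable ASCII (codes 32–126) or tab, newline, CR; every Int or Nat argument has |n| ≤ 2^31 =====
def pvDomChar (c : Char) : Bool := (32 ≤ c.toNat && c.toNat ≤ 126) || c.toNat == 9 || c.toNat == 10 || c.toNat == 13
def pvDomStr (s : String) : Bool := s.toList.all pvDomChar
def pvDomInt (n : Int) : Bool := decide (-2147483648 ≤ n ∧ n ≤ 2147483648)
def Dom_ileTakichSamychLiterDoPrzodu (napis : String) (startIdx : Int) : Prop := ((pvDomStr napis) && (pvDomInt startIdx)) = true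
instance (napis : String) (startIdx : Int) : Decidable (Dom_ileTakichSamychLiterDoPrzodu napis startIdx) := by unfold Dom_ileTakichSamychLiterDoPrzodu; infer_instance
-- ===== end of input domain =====

-- B replaces A's explicit counting loop by the closed-form len(rest) - len(rest.lstrip(litera)) on the suffix;
-- on negative startIdx A's loop wraps back into the prefix, B counts only the suffix run (stated as D_ below).

-- ===== PORT A =====
-- the for-loop with break: recursion over the index list, same state (licznik)
def pvLoopA (s : List Char) (ch : Char) : List Int → Int → Int
  | [], licznik => licznik
  | i :: is, licznik =>
    match PySem.List.pyGet? s i with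
    | some c => if c == ch then pvLoopA s ch is (licznik + 1) else licznik
    | none => licznik  -- IndexError; unreachable for i ∈ range(startIdx, len) under Pre_

def ileTakichSamychLiterDoPrzodu (napis : String) (startIdx : Int) : Int :=
  match PySem.Str.pyGet? napis startIdx with
  | none => 0  -- Python raises IndexError here; excluded by Pre_
  | some poszukiwanaLitera =>
      pvLoopA napis.toList poszukiwanaLitera
        (PySem.List.pyRange startIdx (napis.toList.length : Int) 1) 0

-- ===== PORT B =====
def ileTakichSamychLiterDoPrzodu_alt (napis : String) (startIdx : Int) : Int :=
  match PySem.Str.pyGet? napis startIdx with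
  | none => 0  -- Python raises IndexError here; excluded by Pre_
  | some litera =>
      let rest := PySem.List.slice napis.toList (some startIdx) none
      -- rest.lstrip(litera) with a single character strips exactly the leading run: exact as dropWhile (· == litera)
      ((rest.length : Int) - ((rest.dropWhile (fun c => c == litera)).length : Int))

-- ===== PRECONDITION & SPEC =====
-- Pre_: exactly the inputs where napis[startIdx] does not raise IndexError
def Pre_ileTakichSamychLiterDoPrzodu (napis : String) (startIdx : Int) : Prop :=
  PySem.Raise.InRange napis.toList.length startIdx
instance (napis : String) (startIdx : Int) : Decidable (Pre_ileTakichSamychLiterDoPrzodu napis startIdx) := by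
  unfold Pre_ileTakichSamychLiterDoPrzodu; infer_instance
def pvWitness_ileTakichSamychLiterDoPrzodu : String × Int := ("abc", 1)

-- For negative startIdx where the suffix napis[startIdx:] consists entirely of napis[startIdx] and the first
-- character of napis also equals it, A's range loop wraps past the end back into the prefix and double-counts
-- (A "aa" (-1) = 3), while B returns the length of the consecutive run inside the suffix (B "aa" (-1) = 1),
-- the intended count of consecutive equal characters forward from startIdx.
def D_ileTakichSamychLiterDoPrzodu (napis : String) (startIdx : Int) : Prop :=
  startIdx < 0 ∧ -(napis.toList.length : Int) ≤ startIdx ∧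
  (let suf := napis.toList.drop ((napis.toList.length : Int) + startIdx).toNat
   suf ≠ [] ∧ (suf.all (fun x => suf.head? == some x)) = true ∧ napis.toList.head? = suf.head?)
instance (napis : String) (startIdx : Int) : Decidable (D_ileTakichSamychLiterDoPrzodu napis startIdx) := by
  unfold D_ileTakichSamychLiterDoPrzodu; infer_instance

def Spec_ileTakichSamychLiterDoPrzodu (napis : String) (startIdx : Int) (out : Int) : Prop :=
  ¬ D_ileTakichSamychLiterDoPrzodu napis startIdx → out = ileTakichSamychLiterDoPrzodu_alt napis startIdx
instance (napis : String) (startIdx : Int) (out : Int) : Decidable (Spec_ileTakichSamychLiterDoPrzodu napis startIdx out) := by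
  unfold Spec_ileTakichSamychLiterDoPrzodu; infer_instance

def pvDiffWitness_ileTakichSamychLiterDoPrzodu : String × Int := ("aa", -1)
def pvDiffWitnessOut_ileTakichSamychLiterDoPrzodu : Int × Int := (3, 1)

-- ===== CLAIM (what is proved, stated in full; the proofs are below) =====
def Claim_unchanged_ileTakichSamychLiterDoPrzodu : Prop := ∀ (napis : String) (startIdx : Int), Dom_ileTakichSamychLiterDoPrzodu napis startIdx → Pre_ileTakichSamychLiterDoPrzodu napis startIdx → Spec_ileTakichSamychLiterDoPrzodu napis startIdx (ileTakichSamychLiterDoPrzodu napis startIdx)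
def Claim_changed_ileTakichSamychLiterDoPrzodu : Prop := Dom_ileTakichSamychLiterDoPrzodu (pvDiffWitness_ileTakichSamychLiterDoPrzodu.1) (pvDiffWitness_ileTakichSamychLiterDoPrzodu.2) ∧ Pre_ileTakichSamychLiterDoPrzodu (pvDiffWitness_ileTakichSamychLiterDoPrzodu.1) (pvDiffWitness_ileTakichSamychLiterDoPrzodu.2) ∧ D_ileTakichSamychLiterDoPrzodu (pvDiffWitness_ileTakichSamychLiterDoPrzodu.1) (pvDiffWitness_ileTakichSamychLiterDoPrzodu.2) ∧ ileTakichSamychLiterDoPrzodu (pvDiffWitness_ileTakichSamychLiterDoPrzodu.1) (pvDiffWitness_ileTakichSamychLiterDoPrzodu.2) = pvDiffWitnessOut_ileTakichSamychLiterDoPrzodu.1 ∧ ileTakichSamychLiterDoPrzodu_alt (pvDiffWitness_ileTakichSamychLiterDoPrzodu.1) (pvDiffWitness_ileTakichSamychLiterDoPrzodu.2) = pvDiffWitnessOut_ileTakichSamychLiterDoPrzodu.2 ∧ pvDiffWitnessOut_ileTakichSamychLiterDoPrzodu.1 ≠ pvDiffWitnessOut_ileTakichSamychLiterDoPrzodu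.2
def Claim_exact_ileTakichSamychLiterDoPrzodu : Prop := ∀ (napis : String) (startIdx : Int), Dom_ileTakichSamychLiterDoPrzodu napis startIdx → Pre_ileTakichSamychLiterDoPrzodu napis startIdx → D_ileTakichSamychLiterDoPrzodu napis startIdx → ileTakichSamychLiterDoPrzodu napis startIdx ≠ ileTakichSamychLiterDoPrzodu_alt napis startIdx

-- ===== LEMMAS AND PROOFS =====

-- run length of the leading block of ch, as an Int
def pvCharRun (ch : Char) : List Char → Int
  | [] => 0
  | c :: cs => if c == ch then 1 + pvCharRun ch cs else 0

theorem pvCharRun_nonneg (ch : Char) : ∀ cs : List Char, 0 ≤ pvCharRun ch cs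
  | [] => le_refl 0
  | c :: cs => by
      by_cases h : (c == ch) = true
      · have := pvCharRun_nonneg ch cs
        simp only [pvCharRun, h, if_true]
        omega
      · simp [pvCharRun, h]

theorem pvCharRun_eq_takeWhile (ch : Char) :
    ∀ cs : List Char, pvCharRun ch cs = ((cs.takeWhile (fun c => c == ch)).length : Int)
  | [] => rfl
  | c :: cs => by
      by_cases h : (c == ch) = true
      · simp only [pvCharRun, List.takeWhile_cons, h, if_true, List.length_cons]
        rw [pvCharRun_eq_takeWhile ch cs]
        push_cast
        ring
      · simp [pvCharRun, h]

theorem pvCharRun_append (ch : Char) (ys : List Char) :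
    ∀ xs : List Char, pvCharRun ch (xs ++ ys) =
      if xs.all (fun c => c == ch) then (xs.length : Int) + pvCharRun ch ys else pvCharRun ch xs
  | [] => by simp
  | x :: xs => by
      by_cases h : (x == ch) = true
      · simp only [List.cons_append, pvCharRun, h, if_true, List.all_cons, Bool.true_and,
          pvCharRun_append ch ys xs, List.length_cons]
        by_cases h2 : xs.all (fun c => c == ch) = true
        · simp only [h2, if_true]; push_cast; ring
        · simp [h2]
      · simp [pvCharRun, h]

theorem pvCharRun_all {ch : Char} {xs : List Char} (h : xs.all (fun c => c == ch) = true) :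
    pvCharRun ch xs = (xs.length : Int) := by
  have := pvCharRun_append ch [] xs
  simpa [h] using this

-- the break-loop of A, on an index list that fetches exactly the chars cs
theorem pvLoopA_eq (s : List Char) (ch : Char) :
    ∀ (is : List Int) (cs : List Char) (acc : Int),
      is.map (fun i => PySem.List.pyGet? s i) = cs.map some →
      pvLoopA s ch is acc = acc + pvCharRun ch cs
  | [], cs, acc, h => by
      cases cs with
      | nil => simp [pvLoopA, pvCharRun]
      | cons c cs => simp at h
  | i :: is, cs, acc, h => by
      cases cs with
      | nil => simp at h
      | cons c cs =>
          simp only [List.map_cons, List.cons.injEq] at h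
          obtain ⟨h1, h2⟩ := h
          by_cases hc : (c == ch) = true
          · rw [pvLoopA, h1]
            simp only [hc, if_true]
            rw [pvLoopA_eq s ch is cs (acc + 1) h2]
            simp only [pvCharRun, hc, if_true]
            omega
          · rw [pvLoopA, h1]
            simp only [hc]
            simp [pvCharRun, hc]

-- indices a, a+1, …, len-1 (a ≥ 0) fetch exactly s.drop a
theorem pvFetch_nonneg (s : List Char) :
    ∀ (n a : ℕ), a + n = s.length →
      (PySem.List.pyRange (a : Int) (s.length : Int) 1).map (fun i => PySem.List.pyGet? s i) =
        (s.drop a).map some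
  | 0, a, h => by
      rw [PySem.List.pyRange_one_eq_nil (by omega)]
      simp [List.drop_length, show a = s.length by omega]
  | n + 1, a, h => by
      have ha : a < s.length := by omega
      rw [PySem.List.pyRange_one_cons (by exact_mod_cast by omega)]
      have hcast : ((a : Int) + 1) = ((a + 1 : ℕ) : Int) := by push_cast; ring
      rw [List.map_cons, hcast, pvFetch_nonneg s n (a + 1) (by omega)]
      rw [List.drop_eq_getElem_cons ha, List.map_cons]
      congr 1
      rw [PySem.List.pyGet?_natCast, List.getElem?_eq_getElem ha]

-- indices -n, …, -1 fetch exactly s.drop (len - n)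
theorem pvFetch_neg (s : List Char) :
    ∀ n : ℕ, n ≤ s.length →
      (PySem.List.pyRange (-(n : Int)) 0 1).map (fun i => PySem.List.pyGet? s i) =
        (s.drop (s.length - n)).map some
  | 0, _ => by
      rw [PySem.List.pyRange_one_eq_nil (by omega)]
      simp [List.drop_length]
  | n + 1, h => by
      rw [PySem.List.pyRange_one_cons (by push_cast; omega)]
      have hcast : (-((n + 1 : ℕ) : Int) + 1) = -(n : Int) := by push_cast; ring
      rw [List.map_cons, hcast, pvFetch_neg s n (by omega)]
      have hidx : s.length - (n + 1) < s.length := by omega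
      rw [List.drop_eq_getElem_cons hidx, List.map_cons]
      have hnext : s.length - (n + 1) + 1 = s.length - n := by omega
      rw [hnext]
      congr 1
      rw [PySem.List.pyGet?_neg s (by push_cast; omega) (by push_cast; omega)]
      simp [List.getElem?_eq_getElem hidx]

-- len(cs) - len(dropWhile p cs) = len(takeWhile p cs)
theorem pvSub_dropWhile (p : Char → Bool) (cs : List Char) :
    ((cs.length : Int) - ((cs.dropWhile p).length : Int)) = ((cs.takeWhile p).length : Int) := by
  have h := congrArg List.length (List.takeWhile_append_dropWhile (p := p) (l := cs))
  simp only [List.length_append] at h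
  omega

-- A's loop value under Pre_, by the two sign cases
theorem pvLoopA_value (s : List Char) (ch : Char) (startIdx : Int)
    (hlo : -(s.length : Int) ≤ startIdx) (hhi : startIdx < (s.length : Int)) :
    pvLoopA s ch (PySem.List.pyRange startIdx (s.length : Int) 1) 0 =
      (if 0 ≤ startIdx then
        pvCharRun ch (s.drop startIdx.toNat)
      else
        pvCharRun ch (s.drop ((s.length : Int) + startIdx).toNat ++ s)) := by
  by_cases hpos : 0 ≤ startIdx
  · rw [if_pos hpos]
    have hfetch := pvFetch_nonneg s (s.length - startIdx.toNat) startIdx.toNat (by omega)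
    rw [show ((startIdx.toNat : ℕ) : Int) = startIdx by omega] at hfetch
    rw [pvLoopA_eq s ch _ _ 0 hfetch]
    omega
  · rw [if_neg hpos]
    set k : ℕ := (-startIdx).toNat with hk
    have hks : startIdx = -(k : Int) := by omega
    have hkl : k ≤ s.length := by omega
    have hp : ((s.length : Int) + startIdx).toNat = s.length - k := by omega
    have h1 := pvFetch_neg s k hkl
    have h2 := pvFetch_nonneg s s.length 0 (by omega)
    simp only [Nat.cast_zero] at h2
    have hfetch : (PySem.List.pyRange startIdx (s.length : Int) 1).map
        (fun i => PySem.List.pyGet? s i) = (s.drop (s.length - k) ++ s).map some := by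
      rw [hks, PySem.List.pyRange_one_append (-(k : Int)) 0 (s.length : Int) (by omega) (by omega)]
      rw [List.map_append, h1, h2, List.drop_zero, List.map_append]
    rw [pvLoopA_eq s ch _ _ 0 hfetch, hp]
    omega

-- B's value under Pre_: the run length of the suffix
theorem pvAlt_value (napis : String) (startIdx : Int) (ch : Char)
    (hch : PySem.Str.pyGet? napis startIdx = some ch)
    (hlo : -(napis.toList.length : Int) ≤ startIdx) :
    ileTakichSamychLiterDoPrzodu_alt napis startIdx =
      pvCharRun ch (if 0 ≤ startIdx then napis.toList.drop startIdx.toNat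
                    else napis.toList.drop ((napis.toList.length : Int) + startIdx).toNat) := by
  unfold ileTakichSamychLiterDoPrzodu_alt
  rw [hch]
  by_cases hpos : 0 ≤ startIdx
  · rw [if_pos hpos, PySem.List.slice_from napis.toList hpos]
    dsimp only
    rw [pvSub_dropWhile, ← pvCharRun_eq_takeWhile]
  · rw [if_neg hpos]
    set k : ℕ := (-startIdx).toNat with hk
    have hks : startIdx = -(k : Int) := by omega
    have hp : ((napis.toList.length : Int) + startIdx).toNat = napis.toList.length - k := by omega
    rw [hp, hks, PySem.List.slice_from_neg_natCast napis.toList k (by omega)]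
    dsimp only
    rw [pvSub_dropWhile, ← pvCharRun_eq_takeWhile]

-- A's wrapped first character: the fetched char is the head of the suffix
theorem pvHead_drop (napis : String) (startIdx : Int) (ch : Char)
    (hch : PySem.List.pyGet? napis.toList startIdx = some ch)
    (hneg : startIdx < 0) (hlo : -(napis.toList.length : Int) ≤ startIdx)
    (hplt : ((napis.toList.length : Int) + startIdx).toNat < napis.toList.length) :
    (napis.toList.drop ((napis.toList.length : Int) + startIdx).toNat).head? = some ch := by
  set p : ℕ := ((napis.toList.length : Int) + startIdx).toNat with hpdef
  rw [List.drop_eq_getElem_cons hplt, List.head?_cons]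
  rw [PySem.List.pyGet?_neg napis.toList hneg hlo] at hch
  have hidx : napis.toList.length - (-startIdx).toNat = p := by omega
  rw [hidx, List.getElem?_eq_getElem hplt] at hch
  exact congrArg some (Option.some.inj hch)

-- ===== VERDICT (by name: the statement is the Claim_ definition above) =====
theorem ileTakichSamychLiterDoPrzodu_spec : Claim_unchanged_ileTakichSamychLiterDoPrzodu := by
  intro napis startIdx hDom hPre hnD
  unfold Pre_ileTakichSamychLiterDoPrzodu PySem.Raise.InRange at hPre
  obtain ⟨hlo, hhi⟩ := hPre
  cases hch : PySem.Str.pyGet? napis startIdx with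
  | none =>
      exfalso
      rw [PySem.Str.pyGet?, PySem.Chars.pyGet?, PySem.List.pyGet?_eq_none_iff] at hch
      exact hch ⟨hlo, hhi⟩
  | some ch =>
      have hchL : PySem.List.pyGet? napis.toList startIdx = some ch := hch
      have hA : ileTakichSamychLiterDoPrzodu napis startIdx =
          pvLoopA napis.toList ch (PySem.List.pyRange startIdx (napis.toList.length : Int) 1) 0 := by
        unfold ileTakichSamychLiterDoPrzodu
        rw [hch]
      rw [hA, pvLoopA_value napis.toList ch startIdx hlo hhi,
          pvAlt_value napis startIdx ch hch hlo]
      by_cases hpos : 0 ≤ startIdx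
      · rw [if_pos hpos, if_pos hpos]
      · rw [if_neg hpos, if_neg hpos]
        set p : ℕ := ((napis.toList.length : Int) + startIdx).toNat with hpdef
        have hplt : p < napis.toList.length := by omega
        rw [pvCharRun_append]
        by_cases hall : (napis.toList.drop p).all (fun c => c == ch) = true
        · rw [if_pos hall]
          -- the suffix is all ch; ¬D_ forces the first char of napis to differ from ch
          have hhead := pvHead_drop napis startIdx ch hchL (by omega) hlo hplt
          rw [← hpdef] at hhead
          have hne : napis.toList.head? ≠ some ch := by
            intro hcontra
            apply hnD
            refine ⟨by omega, hlo, ?_⟩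
            rw [← hpdef]
            have hsufne : napis.toList.drop p ≠ [] := by
              apply List.ne_nil_of_length_pos
              rw [List.length_drop]
              omega
            refine ⟨hsufne, ?_, by rw [hhead, hcontra]⟩
            rw [hhead, List.all_eq_true]
            rw [List.all_eq_true] at hall
            intro x hx
            have hx2 := hall x hx
            simp only [beq_iff_eq, Option.some.injEq] at hx2 ⊢
            exact hx2.symm
          have hzero : pvCharRun ch napis.toList = 0 := by
            cases hs : napis.toList with
            | nil => rfl
            | cons c0 t =>
                have hc0 : c0 ≠ ch := by
                  intro he; apply hne; rw [hs, he, List.head?_cons]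
                simp [pvCharRun, hc0]
          rw [hzero, pvCharRun_all hall]
          omega
        · rw [if_neg hall]

theorem ileTakichSamychLiterDoPrzodu_changed : Claim_changed_ileTakichSamychLiterDoPrzodu := by
  unfold Claim_changed_ileTakichSamychLiterDoPrzodu; decide

theorem ileTakichSamychLiterDoPrzodu_tight : Claim_exact_ileTakichSamychLiterDoPrzodu := by
  intro napis startIdx hDom hPre hD
  obtain ⟨hneg, hlo, hD3⟩ := hD
  unfold Pre_ileTakichSamychLiterDoPrzodu PySem.Raise.InRange at hPre
  obtain ⟨_, hhi⟩ := hPre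
  cases hch : PySem.Str.pyGet? napis startIdx with
  | none =>
      exfalso
      rw [PySem.Str.pyGet?, PySem.Chars.pyGet?, PySem.List.pyGet?_eq_none_iff] at hch
      exact hch ⟨hlo, hhi⟩
  | some ch =>
      have hchL : PySem.List.pyGet? napis.toList startIdx = some ch := hch
      have hA : ileTakichSamychLiterDoPrzodu napis startIdx =
          pvLoopA napis.toList ch (PySem.List.pyRange startIdx (napis.toList.length : Int) 1) 0 := by
        unfold ileTakichSamychLiterDoPrzodu
        rw [hch]
      rw [hA, pvLoopA_value napis.toList ch startIdx hlo hhi,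
          pvAlt_value napis startIdx ch hch hlo]
      rw [if_neg (by omega), if_neg (by omega)]
      set p : ℕ := ((napis.toList.length : Int) + startIdx).toNat with hpdef
      have hplt : p < napis.toList.length := by omega
      obtain ⟨hne, hall, hheads⟩ := hD3
      have hhead := pvHead_drop napis startIdx ch hchL hneg hlo hplt
      rw [← hpdef] at hhead
      have hall' : (napis.toList.drop p).all (fun c => c == ch) = true := by
        rw [hhead, List.all_eq_true] at hall
        rw [List.all_eq_true]
        intro x hx
        have hx2 := hall x hx
        simp only [beq_iff_eq, Option.some.injEq] at hx2 ⊢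
        exact hx2.symm
      rw [pvCharRun_append, if_pos hall', pvCharRun_all hall']
      -- napis starts with ch, so the wrapped part counts at least one more
      have hone : 1 ≤ pvCharRun ch napis.toList := by
        rw [hhead] at hheads
        cases hs : napis.toList with
        | nil => rw [hs] at hheads; simp at hheads
        | cons c0 t =>
            rw [hs, List.head?_cons] at hheads
            have hc0 : c0 = ch := Option.some.inj hheads
            have ht := pvCharRun_nonneg ch t
            simp only [pvCharRun, hc0, BEq.rfl, if_true]
            omega
      omega
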